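-- pv_equiv track=rewrite | github.com/Ualabi/Past_Google_Kick_Starts | 2018/Round B/1 No Nine.py | solve
-- ===== SOURCE A (Python) =====
-- def solve(N):
--     a = 0
--     for i in range(N-N%10,N+1):
--         if "9" not in str(i) and i%9 != 0:
--             a += 1
--     N -= N%10
--     b, m = 0, 1
--     while N:
--         b += (N%10)*m
--         m *= 9
--         N = N//10
--     return a +  8 * b//9
-- ===== SOURCE B (Python) =====
-- # Same closed-form result as A, computed differently: the base-9 value of the
-- # decade prefix by top-down recursion (A accumulates bottom-up with a running
-- # multiplier) and the last-decade count in O(1) arithmetic (A brute-counts it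
-- # with a string test per number).
-- def solve(N):
--     k, r = divmod(N, 10)
--     if '9' in str(k):
--         tail = 0
--     else:
--         m = min(r, 8)
--         tail = m + 1 - (1 if (-k) % 9 <= m else 0)
--
--     def g(x):
--         return 0 if x == 0 else 9 * g(x // 10) + x % 10
--
--     return tail + 8 * g(k)
-- ===== Notes on version B (the rewrite author's own statement) =====
-- stated objective: alternative
-- what changed: B computes the decade-prefix base-9 value by top-down recursion instead of A's bottom-up multiplier loop, and replaces A's brute-force loop with a per-number string test over the last decade by a single string test on the prefix plus an O(1) arithmetic count (using 10 = 1 mod 9).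
import Mathlib
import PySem

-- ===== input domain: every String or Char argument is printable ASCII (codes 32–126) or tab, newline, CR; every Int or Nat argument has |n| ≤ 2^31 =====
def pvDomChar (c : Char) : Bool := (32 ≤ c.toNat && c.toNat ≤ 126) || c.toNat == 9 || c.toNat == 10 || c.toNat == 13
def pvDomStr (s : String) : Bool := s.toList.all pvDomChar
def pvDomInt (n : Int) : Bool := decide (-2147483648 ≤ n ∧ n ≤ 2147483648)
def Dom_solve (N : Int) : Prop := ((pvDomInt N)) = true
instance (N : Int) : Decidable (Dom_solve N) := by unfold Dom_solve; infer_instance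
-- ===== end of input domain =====

-- B computes the same closed form as A by a different decomposition: top-down recursion
-- for the base-9 prefix value (A: bottom-up multiplier loop) and an O(1) arithmetic count
-- for the last decade (A: brute loop with a string test per number).

-- ===== PORT A =====

-- A's `while N:` loop (b accumulates digits with multiplier m). Exact for the nonnegative
-- arguments Pre_ admits (the recursion is Python's N//10, N%10 on nonneg ints);
-- the Python loop diverges for N < 0, which Pre_solve excludes.
def solveWhile (n : Nat) (b m : Int) : Int :=
  if n = 0 then b else solveWhile (n / 10) (b + (n % 10 : Nat) * m) (m * 9)
decreasing_by exact Nat.div_lt_self (Nat.pos_of_ne_zero (by assumption)) (by norm_num)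

def solve (N : Int) : Int :=
  -- a := loop `for i in range(N-N%10, N+1): if "9" not in str(i) and i%9 != 0: a += 1`,
  -- b := the while loop on N - N%10, result a + 8*b//9
  (PySem.List.pyRange (N - PySem.Int.mod N 10) (N + 1) 1).foldl
      (fun a i =>
        if ¬(PySem.Str.isIn "9" (PySem.Int.toStr i) = true) ∧ PySem.Int.mod i 9 ≠ 0
        then a + 1 else a) 0
    + PySem.Int.floordiv (8 * solveWhile (N - PySem.Int.mod N 10).toNat 0 1) 9

-- ===== PORT B =====

-- B's recursive g(x) = 0 if x == 0 else 9*g(x//10) + x%10. Exact for x ≥ 0 (all inputs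
-- Pre_ admits); the Python recursion diverges for negative x, which Pre_solve excludes.
def altBase9 (x : Nat) : Int :=
  if x = 0 then 0 else 9 * altBase9 (x / 10) + (x % 10 : Nat)
decreasing_by exact Nat.div_lt_self (Nat.pos_of_ne_zero (by assumption)) (by norm_num)

def solve_alt (N : Int) : Int :=
  -- k, r = divmod(N, 10); tail as in Source B; tail + 8 * g(k)
  (if PySem.Str.isIn "9" (PySem.Int.toStr (PySem.Int.floordiv N 10)) = true then 0
   else min (PySem.Int.mod N 10) 8 + 1
     - (if PySem.Int.mod (-(PySem.Int.floordiv N 10)) 9 ≤ min (PySem.Int.mod N 10) 8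
        then (1:Int) else 0))
  + 8 * altBase9 (PySem.Int.floordiv N 10).toNat

-- ===== PRECONDITION & SPEC =====

-- Pre_ excludes exactly N < 0, where Python A never returns (its `while N:` loop runs
-- forever once N//10 reaches -1); B's recursion diverges there too.
def Pre_solve (N : Int) : Prop := 0 ≤ N
instance (N : Int) : Decidable (Pre_solve N) := by unfold Pre_solve; infer_instance

def pvWitness_solve : Int := (95)

def Spec_solve (N : Int) (out : Int) : Prop := out = solve_alt N
instance (N : Int) (out : Int) : Decidable (Spec_solve N out) := by unfold Spec_solve; infer_instance

-- ===== CLAIM (what is proved, stated in full; the proofs are below) =====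
def Claim_equal_solve : Prop := ∀ (N : Int), Dom_solve N → Pre_solve N → Spec_solve N (solve N)

-- ===== LEMMAS AND PROOFS =====

-- decimal digit characters of n, most significant first (what str(n) produces for n ≥ 0)
def rep (n : Nat) : List Char :=
  if n < 10 then [Nat.digitChar n] else rep (n / 10) ++ [Nat.digitChar (n % 10)]
decreasing_by exact Nat.div_lt_self (by omega) (by norm_num)

theorem toDigitsCore_append (f : Nat) : ∀ (n : Nat) (ds : List Char),
    Nat.toDigitsCore 10 f n ds = Nat.toDigitsCore 10 f n [] ++ ds := by
  induction f with
  | zero => intro n ds; simp [Nat.toDigitsCore]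
  | succ f ih =>
    intro n ds
    simp only [Nat.toDigitsCore]
    by_cases h : n / 10 = 0
    · simp [h]
    · simp only [h, if_false]
      rw [ih (n / 10) [(n % 10).digitChar], ih (n / 10) ((n % 10).digitChar :: ds)]
      simp

theorem toDigitsCore_eq_rep (f : Nat) : ∀ n : Nat, n < f →
    Nat.toDigitsCore 10 f n [] = rep n := by
  induction f with
  | zero => omega
  | succ f ih =>
    intro n hn
    simp only [Nat.toDigitsCore]
    by_cases h : n / 10 = 0
    · have h10 : n < 10 := by omega
      rw [if_pos h, rep, if_pos h10, Nat.mod_eq_of_lt h10]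
    · have h10 : ¬ n < 10 := by omega
      simp only [h, if_false]
      rw [toDigitsCore_append, ih (n / 10) (by omega)]
      conv_rhs => rw [rep]
      rw [if_neg h10]

theorem toChars_eq_rep (i : Int) (hi : 0 ≤ i) : PySem.Int.toChars i = rep i.toNat := by
  unfold PySem.Int.toChars
  rw [if_neg (by omega)]
  exact toDigitsCore_eq_rep _ _ (Nat.lt_succ_self _)

theorem isIn_nine_iff (i : Int) (hi : 0 ≤ i) :
    PySem.Str.isIn "9" (PySem.Int.toStr i) = true ↔ '9' ∈ rep i.toNat := by
  rw [PySem.Str.isIn_iff_infix, PySem.Int.toList_toStr, toChars_eq_rep i hi]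
  exact List.singleton_infix_iff '9' _

theorem mem_rep_ten (k u : Nat) (hu : u < 10) :
    '9' ∈ rep (10 * k + u) ↔ ('9' ∈ rep k ∨ u = 9) := by
  by_cases hk : k = 0
  · subst hk
    have h0 : rep 0 = ['0'] := by rw [rep, if_pos (by norm_num)]; decide
    have h1 : rep (10 * 0 + u) = [Nat.digitChar u] := by
      rw [rep, if_pos (by omega)]
      norm_num
    rw [h0, h1, List.mem_singleton]
    have h3 : ('9' = Nat.digitChar u) ↔ u = 9 := by interval_cases u <;> decide
    rw [h3]
    simp
  · have hge : ¬ 10 * k + u < 10 := by omega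
    rw [rep]
    simp only [hge, if_false]
    have h1 : (10 * k + u) / 10 = k := by omega
    have h2 : (10 * k + u) % 10 = u := by omega
    rw [h1, h2, List.mem_append, List.mem_singleton]
    have h3 : ('9' = Nat.digitChar u) ↔ u = 9 := by interval_cases u <;> decide
    rw [h3]

-- A's while loop computes b + m * (base-9 value of the digits of n)
theorem solveWhile_eq (n : Nat) : ∀ b m : Int, solveWhile n b m = b + m * altBase9 n := by
  induction n using Nat.strong_induction_on with
  | _ n ih =>
    intro b m
    rw [solveWhile, altBase9]
    by_cases h : n = 0
    · simp [h]
    · rw [if_neg h, if_neg h, ih (n / 10) (Nat.div_lt_self (by omega) (by norm_num))]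
      ring

theorem altBase9_ten (k : Nat) : altBase9 (10 * k) = 9 * altBase9 k := by
  by_cases hk : k = 0
  · subst hk
    rw [show 10 * 0 = 0 from rfl, altBase9]
    simp
  · rw [altBase9, if_neg (by omega)]
    have h1 : 10 * k / 10 = k := by omega
    have h2 : 10 * k % 10 = 0 := by omega
    rw [h1, h2]
    simp

-- i = 10k+u is counted by A's loop body iff k is 9-free, u ≠ 9 and (k%9 + u) % 9 ≠ 0
theorem cond_shift (k : Int) (hk : 0 ≤ k) (u : Nat) (hu : u < 10) :
    ((¬(PySem.Str.isIn "9" (PySem.Int.toStr (10 * k + (u : Int))) = true)) ∧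
        PySem.Int.mod (10 * k + (u : Int)) 9 ≠ 0)
    ↔ (¬(PySem.Str.isIn "9" (PySem.Int.toStr k) = true)) ∧
        (u ≠ 9 ∧ (k % 9 + (u : Int)) % 9 ≠ 0) := by
  have h1 : (10 * k + (u : Int)).toNat = 10 * k.toNat + u := by omega
  rw [isIn_nine_iff _ (by omega), h1, mem_rep_ten k.toNat u hu, isIn_nine_iff k hk,
    PySem.Int.mod_eq_emod_of_pos (by norm_num : (0:Int) < 9)]
  have hm : (10 * k + (u : Int)) % 9 = (k % 9 + (u : Int)) % 9 := by omega
  rw [hm]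
  have hcast : ((u : Nat) = 9) ↔ ((u : Int) - (u : Int) = 0 ∧ u = 9) := by omega
  constructor
  · rintro ⟨hA, hB⟩
    rw [not_or] at hA
    exact ⟨hA.1, fun h => hA.2 (by omega), hB⟩
  · rintro ⟨hA, hB, hC⟩
    exact ⟨by rw [not_or]; exact ⟨hA, fun h => hB (by omega)⟩, hC⟩

-- counted indicator, as a pure arithmetic function of c = k % 9
def ind (c : Int) (u : Nat) : Int := if u ≠ 9 ∧ (c + (u : Int)) % 9 ≠ 0 then 1 else 0

theorem fold_eq_zero (k : Int) (hk : 0 ≤ k)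
    (h9 : PySem.Str.isIn "9" (PySem.Int.toStr k) = true) :
    ∀ n : Nat, n ≤ 10 → ∀ a0 : Int,
      ((List.range n).map (fun (j : Nat) => 10 * k + (j : Int))).foldl
        (fun a i =>
          if ¬(PySem.Str.isIn "9" (PySem.Int.toStr i) = true) ∧ PySem.Int.mod i 9 ≠ 0
          then a + 1 else a) a0 = a0 := by
  intro n
  induction n with
  | zero => intro _ a0; simp
  | succ n ih =>
    intro hn a0
    rw [List.range_succ]
    simp only [List.map_append, List.map_cons, List.map_nil, List.foldl_append,
      List.foldl_cons, List.foldl_nil]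
    rw [ih (by omega) a0]
    rw [if_neg (fun h => ((cond_shift k hk n (by omega)).mp h).1 h9)]

theorem fold_eq_sum (k : Int) (hk : 0 ≤ k)
    (h9 : ¬(PySem.Str.isIn "9" (PySem.Int.toStr k) = true)) :
    ∀ n : Nat, n ≤ 10 → ∀ a0 : Int,
      ((List.range n).map (fun (j : Nat) => 10 * k + (j : Int))).foldl
        (fun a i =>
          if ¬(PySem.Str.isIn "9" (PySem.Int.toStr i) = true) ∧ PySem.Int.mod i 9 ≠ 0
          then a + 1 else a) a0
      = a0 + ((List.range n).map (fun u => ind (k % 9) u)).sum := by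
  intro n
  induction n with
  | zero => intro _ a0; simp
  | succ n ih =>
    intro hn a0
    rw [List.range_succ]
    simp only [List.map_append, List.map_cons, List.map_nil, List.foldl_append,
      List.foldl_cons, List.foldl_nil, List.sum_append, List.sum_cons, List.sum_nil]
    rw [ih (by omega) a0]
    by_cases hc : (n ≠ 9 ∧ (k % 9 + (n : Int)) % 9 ≠ 0)
    · rw [if_pos ((cond_shift k hk n (by omega)).mpr ⟨h9, hc⟩), ind, if_pos hc]
      ring
    · rw [if_neg (fun h => hc ((cond_shift k hk n (by omega)).mp h).2), ind, if_neg hc]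
      ring

theorem sum_ind_eq (c : Int) (hc0 : 0 ≤ c) (hc : c < 9) (r : Nat) (hr : r < 10) :
    ((List.range (r + 1)).map (fun u => ind c u)).sum
      = min (r : Int) 8 + 1 - (if (9 - c) % 9 ≤ min (r : Int) 8 then 1 else 0) := by
  interval_cases c <;> interval_cases r <;> decide

-- the last-decade count: A's brute loop over [10k, 10k+r] equals B's O(1) formula
theorem decade_count (k : Int) (hk : 0 ≤ k) (r : Nat) (hr : r < 10) :
    (PySem.List.pyRange (10 * k) (10 * k + (r : Int) + 1) 1).foldl
      (fun a i =>
        if ¬(PySem.Str.isIn "9" (PySem.Int.toStr i) = true) ∧ PySem.Int.mod i 9 ≠ 0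
        then a + 1 else a) (0 : Int)
    = if PySem.Str.isIn "9" (PySem.Int.toStr k) = true then 0
      else min (r : Int) 8 + 1 - (if PySem.Int.mod (-k) 9 ≤ min (r : Int) 8 then 1 else 0) := by
  rw [PySem.List.pyRange_one,
    show (10 * k + (r : Int) + 1 - 10 * k).toNat = r + 1 from by omega]
  by_cases h9 : PySem.Str.isIn "9" (PySem.Int.toStr k) = true
  · rw [if_pos h9, fold_eq_zero k hk h9 (r + 1) (by omega) 0]
  · rw [if_neg h9, fold_eq_sum k hk h9 (r + 1) (by omega) 0,
      sum_ind_eq (k % 9) (Int.emod_nonneg k (by norm_num)) (by omega) r hr,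
      PySem.Int.mod_eq_emod_of_pos (by norm_num : (0:Int) < 9),
      show (-k) % 9 = (9 - k % 9) % 9 from by omega]
    ring

-- ===== VERDICT (by name: the statement is the Claim_ definition above) =====
theorem solve_spec : Claim_equal_solve := by
  intro N _ hN
  unfold Spec_solve solve solve_alt
  obtain ⟨n, rfl⟩ : ∃ n : Nat, N = (n : Int) := ⟨N.toNat, (Int.toNat_of_nonneg hN).symm⟩
  have hmodN : PySem.Int.mod (n : Int) 10 = ((n % 10 : Nat) : Int) := by
    rw [PySem.Int.mod_eq_emod_of_pos (by norm_num : (0:Int) < 10)]; omega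
  have hfdN : PySem.Int.floordiv (n : Int) 10 = ((n / 10 : Nat) : Int) := by
    rw [PySem.Int.floordiv_eq_ediv_of_pos (by norm_num : (0:Int) < 10)]; omega
  rw [hmodN, hfdN]
  rw [show (n : Int) - ((n % 10 : Nat) : Int) = 10 * ((n / 10 : Nat) : Int) from by omega]
  rw [show (n : Int) + 1 = 10 * ((n / 10 : Nat) : Int) + ((n % 10 : Nat) : Int) + 1 from by omega]
  rw [decade_count ((n / 10 : Nat) : Int) (by omega) (n % 10) (Nat.mod_lt _ (by norm_num))]
  rw [show (10 * ((n / 10 : Nat) : Int)).toNat = 10 * (n / 10) from by omega]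
  rw [solveWhile_eq, altBase9_ten, Int.toNat_natCast]
  rw [show (8 : Int) * (0 + 1 * (9 * altBase9 (n / 10))) = 9 * (8 * altBase9 (n / 10)) from by ring]
  rw [PySem.Int.floordiv_eq_ediv_of_pos (by norm_num : (0:Int) < 9),
    Int.mul_ediv_cancel_left _ (by norm_num : (9:Int) ≠ 0)]
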